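-- pv_equiv track=rewrite | github.com/alexis-raymond/Daily_Coding_Problems | newsletter/problem_21.py | numberOfRooms
-- ===== SOURCE A (Python) =====
-- def numberOfRooms(classes): # returns the minimum number of rooms needed for a schedule
-- 	if(len(classes) == 1): # return 1 if there is only 1 class scheduled
-- 		return 1
--
-- 	times = set() # create an empty set for all the time indices (sets are ideal because they don't accept duplicates)
--
-- 	for lecture in classes: # iterate through all the lectures in the schedule
-- 		times.add(lecture[0]) # add the start time to the set of indices
-- 		times.add(lecture[1]) # add the end time to the set of indices
--
-- 	times = sorted(list(times)) # convert the set of indices to a sorted list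
--
-- 	overlaps = [] # create an empty list to hold the number of classes overlapping at each time index
--
-- 	for time in times: # iterate through all the time indices
-- 		overlapCount = 0 # create a variable to hold the count of overlaps at each time index
--
-- 		for lecture in classes: # iterate through all the lectures in the schedule
-- 			if((time >= lecture[0]) and (time < lecture[1])): # if the class is happening at this time index, add 1 to the count
-- 				overlapCount += 1
--
-- 		overlaps.append(overlapCount) # add the overlap count to the list with all the time indices
--
-- 	return max(overlaps) # return the max number of overlaps during the schedule (minimum number of rooms needed)
-- ===== SOURCE B (Python) =====
-- def numberOfRooms(classes):
--     if len(classes) == 1: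
--         return 1
--     events = []
--     for lecture in classes:
--         if lecture[0] < lecture[1]:
--             events.append((lecture[0], 1))
--             events.append((lecture[1], -1))
--     events.sort()
--     best = 0
--     cur = 0
--     for _, delta in events:
--         cur += delta
--         if cur > best:
--             best = cur
--     return best
-- ===== Notes on version B (the rewrite author's own statement) =====
-- stated objective: alternative
-- what changed: Replaces A's per-time-point recount of running lectures (a nested scan over all classes at every distinct start/end time) by a single sorted (time, +1/-1) event sweep that tracks the running number of concurrent lectures and its maximum.
import Mathlib
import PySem

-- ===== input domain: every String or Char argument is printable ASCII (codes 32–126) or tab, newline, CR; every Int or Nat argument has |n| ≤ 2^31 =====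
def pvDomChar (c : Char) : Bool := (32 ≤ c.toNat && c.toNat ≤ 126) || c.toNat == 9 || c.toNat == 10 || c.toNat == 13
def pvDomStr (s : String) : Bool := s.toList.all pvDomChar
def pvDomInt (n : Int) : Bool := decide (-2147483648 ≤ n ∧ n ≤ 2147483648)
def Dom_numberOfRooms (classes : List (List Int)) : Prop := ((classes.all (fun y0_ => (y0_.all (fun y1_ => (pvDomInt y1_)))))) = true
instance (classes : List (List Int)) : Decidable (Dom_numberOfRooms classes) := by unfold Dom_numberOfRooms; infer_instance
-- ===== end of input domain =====

-- B replaces A's per-time-point overlap recount by a single sorted sweep over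
-- (time, ±1) events tracking the running number of concurrent lectures (objective: alternative).

-- ===== PORT A =====
def numberOfRooms (classes : List (List Int)) : Int :=
  if classes.length == 1 then 1
  else
    let times : PySem.Set Int := classes.foldl
      (fun (ts : PySem.Set Int) lecture =>
        PySem.Set.add (PySem.Set.add ts ((PySem.List.pyGet? lecture 0).getD 0))
          ((PySem.List.pyGet? lecture 1).getD 0))
      PySem.Set.empty
    let timesL := PySem.List.sorted times (fun x => x) false
    let overlaps := timesL.foldl
      (fun (ov : List Int) time =>
        ov ++ [classes.foldl
          (fun (c : Int) lecture =>
            if ((PySem.List.pyGet? lecture 0).getD 0 ≤ time ∧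
                time < (PySem.List.pyGet? lecture 1).getD 0) then c + 1 else c) 0])
      []
    (PySem.List.max? overlaps (fun x => x)).getD 0

-- ===== PORT B =====
def numberOfRooms_alt (classes : List (List Int)) : Int :=
  if classes.length == 1 then 1
  else
    let events : List (Int × Int) := classes.foldl
      (fun (evs : List (Int × Int)) lecture =>
        if ((PySem.List.pyGet? lecture 0).getD 0 < (PySem.List.pyGet? lecture 1).getD 0) then
          evs ++ [((PySem.List.pyGet? lecture 0).getD 0, 1),
                  ((PySem.List.pyGet? lecture 1).getD 0, -1)]
        else evs)
      []
    let sortedEvents := PySem.List.sorted2 events (fun ev => ev.1) (fun ev => ev.2) false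
    let res := sortedEvents.foldl
      (fun (p : Int × Int) ev =>
        let cur := p.2 + ev.2
        (if cur > p.1 then cur else p.1, cur))
      (0, 0)
    res.1

-- ===== PRECONDITION & SPEC =====
-- Pre_ excludes exactly the inputs on which the Python A raises: the empty schedule
-- (max() of an empty list, ValueError) and, when there is more than one class, any
-- lecture with fewer than two entries (IndexError on lecture[0]/lecture[1]).
def Pre_numberOfRooms (classes : List (List Int)) : Prop :=
  classes ≠ [] ∧ (classes.length = 1 ∨ ∀ l ∈ classes, 2 ≤ l.length)
instance (classes : List (List Int)) : Decidable (Pre_numberOfRooms classes) := by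
  unfold Pre_numberOfRooms; infer_instance
def pvWitness_numberOfRooms : List (List Int) := [[0, 3], [2, 5]]

def Spec_numberOfRooms (classes : List (List Int)) (out : Int) : Prop := out = numberOfRooms_alt classes
instance (classes : List (List Int)) (out : Int) : Decidable (Spec_numberOfRooms classes out) := by unfold Spec_numberOfRooms; infer_instance

-- ===== CLAIM (what is proved, stated in full; the proofs are below) =====
def Claim_equal_numberOfRooms : Prop := ∀ (classes : List (List Int)), Dom_numberOfRooms classes → Pre_numberOfRooms classes → Spec_numberOfRooms classes (numberOfRooms classes)

-- ===== LEMMAS AND PROOFS =====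

-- lecture[0] / lecture[1] as read by both ports
def pvS (l : List Int) : Int := (PySem.List.pyGet? l 0).getD 0
def pvE (l : List Int) : Int := (PySem.List.pyGet? l 1).getD 0

-- the lectures that actually occupy a room (start < end)
def pvN (classes : List (List Int)) : List (List Int) :=
  classes.filter (fun l => decide (pvS l < pvE l))

-- A's overlap condition at time t
def pvCond (t : Int) (l : List Int) : Bool := decide (pvS l ≤ t ∧ t < pvE l)

-- number of lectures running at time t (A's inner count)
def pvF (classes : List (List Int)) (t : Int) : Int := (classes.countP (pvCond t) : Int)

-- B's event list, before sorting
def pvEv (classes : List (List Int)) : List (Int × Int) :=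
  (pvN classes).flatMap (fun l => [(pvS l, 1), (pvE l, -1)])

-- lexicographic ≤ on events (Python's tuple order)
def pvLe (a b : Int × Int) : Prop := a.1 < b.1 ∨ (a.1 = b.1 ∧ a.2 ≤ b.2)

-- B's sweep step
def pvStep (p : Int × Int) (ev : Int × Int) : Int × Int :=
  (if p.2 + ev.2 > p.1 then p.2 + ev.2 else p.1, p.2 + ev.2)

-- sum of the deltas of an event list
def pvSum (P : List (Int × Int)) : Int := (P.map (fun ev => ev.2)).sum

-- start/end counts of pvN below a bound
def pvCS (classes : List (List Int)) (u : Int) : Int :=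
  ((pvN classes).countP (fun l => decide (pvS l ≤ u)) : Int)
def pvCE (classes : List (List Int)) (u : Int) : Int :=
  ((pvN classes).countP (fun l => decide (pvE l ≤ u)) : Int)

-- ---------- generic list lemmas specific to the two programs ----------

theorem pv_foldl_set_mem (classes : List (List Int)) (s0 : PySem.Set Int) (t : Int) :
    t ∈ classes.foldl
      (fun (ts : PySem.Set Int) lecture =>
        PySem.Set.add (PySem.Set.add ts (pvS lecture)) (pvE lecture)) s0 ↔
      t ∈ s0 ∨ ∃ l ∈ classes, pvS l = t ∨ pvE l = t := by
  induction classes generalizing s0 with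
  | nil => simp
  | cons hd tl ih =>
    simp only [List.foldl_cons, ih, PySem.Set.mem_add, List.mem_cons]
    constructor
    · rintro (((h | h) | h) | ⟨l, hl, h⟩)
      · exact Or.inl h
      · exact Or.inr ⟨hd, Or.inl rfl, Or.inl h.symm⟩
      · exact Or.inr ⟨hd, Or.inl rfl, Or.inr h.symm⟩
      · exact Or.inr ⟨l, Or.inr hl, h⟩
    · rintro (h | ⟨l, (rfl | hl), h⟩)
      · exact Or.inl (Or.inl (Or.inl h))
      · rcases h with h | h
        · exact Or.inl (Or.inl (Or.inr h.symm))
        · exact Or.inl (Or.inr h.symm)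
      · exact Or.inr ⟨l, hl, h⟩

theorem pv_foldl_ev (classes : List (List Int)) (acc : List (Int × Int)) :
    classes.foldl
      (fun (evs : List (Int × Int)) lecture =>
        if (pvS lecture < pvE lecture) then
          evs ++ [(pvS lecture, 1), (pvE lecture, -1)]
        else evs) acc
      = acc ++ pvEv classes := by
  induction classes generalizing acc with
  | nil => simp [pvEv, pvN]
  | cons hd tl ih =>
    simp only [List.foldl_cons, ih, pvEv, pvN, List.filter_cons]
    by_cases h : pvS hd < pvE hd <;> simp [h]

theorem pv_flat2_countP (L : List (List Int)) (p : Int × Int → Bool) :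
    (L.flatMap (fun l => [(pvS l, (1 : Int)), (pvE l, -1)])).countP p
      = L.countP (fun l => p (pvS l, 1)) + L.countP (fun l => p (pvE l, -1)) := by
  induction L with
  | nil => simp
  | cons hd tl ih =>
    simp only [List.flatMap_cons, List.countP_append, List.countP_cons, ih]
    by_cases h1 : p (pvS hd, 1) <;> by_cases h2 : p (pvE hd, -1) <;>
      simp [h1, h2] <;> omega

-- pvSum in terms of start/end counts (all deltas are ±1)
theorem pv_sum_eq_counts (P : List (Int × Int))
    (hd : ∀ ev ∈ P, ev.2 = 1 ∨ ev.2 = -1) :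
    pvSum P = (P.countP (fun ev => decide (ev.2 = 1)) : Int)
              - (P.countP (fun ev => decide (ev.2 = -1)) : Int) := by
  induction P with
  | nil => simp [pvSum]
  | cons hd' tl ih =>
    have h1 := hd hd' (List.mem_cons_self ..)
    have h2 : pvSum tl = (tl.countP (fun ev => decide (ev.2 = 1)) : Int)
        - (tl.countP (fun ev => decide (ev.2 = -1)) : Int) :=
      ih (fun ev hev => hd ev (List.mem_cons_of_mem _ hev))
    simp only [pvSum, List.map_cons, List.sum_cons, List.countP_cons] at *
    rcases h1 with h1 | h1 <;> simp [h1] <;> omega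

-- A's pointwise count as a difference of cumulative counts
theorem pv_f_split (classes : List (List Int)) (t : Int) :
    pvF classes t = pvCS classes t - pvCE classes t := by
  have h1 : classes.countP (pvCond t) = (pvN classes).countP (pvCond t) := by
    rw [pvN, List.countP_filter]
    refine List.countP_congr (fun l _ => ?_)
    simp only [pvCond, Bool.and_eq_true, decide_eq_true_eq]
    constructor
    · intro h; exact ⟨h, by omega⟩
    · intro h; exact h.1
  have h2 : ∀ (L : List (List Int)), (∀ l ∈ L, pvS l < pvE l) →
      (L.countP (pvCond t) : Int)
        = (L.countP (fun l => decide (pvS l ≤ t)) : Int)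
          - (L.countP (fun l => decide (pvE l ≤ t)) : Int) := by
    intro L hL
    induction L with
    | nil => simp
    | cons hd tl ih =>
      have hhd := hL hd (List.mem_cons_self ..)
      have htl := ih (fun l hl => hL l (List.mem_cons_of_mem _ hl))
      simp only [List.countP_cons, pvCond] at *
      by_cases c1 : pvS hd ≤ t ∧ t < pvE hd <;>
        by_cases c2 : pvS hd ≤ t <;> by_cases c3 : pvE hd ≤ t <;>
          simp [c1, c2, c3] <;> omega
  have h3 : ∀ l ∈ pvN classes, pvS l < pvE l := by
    intro l hl
    simp only [pvN, List.mem_filter, decide_eq_true_eq] at hl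
    exact hl.2
  rw [pvF, h1, h2 _ h3, pvCS, pvCE]

theorem pv_f_nonneg (classes : List (List Int)) (t : Int) : 0 ≤ pvF classes t := by
  exact Int.natCast_nonneg _

-- the maximal start time ≤ t dominates the count at t (and lies in pvN)
theorem pv_star (classes : List (List Int)) (t : Int)
    (h : 0 < classes.countP (pvCond t)) :
    ∃ l₀ ∈ pvN classes, pvF classes t ≤ pvF classes (pvS l₀) := by
  classical
  set Lc := (pvN classes).filter (fun l => decide (pvS l ≤ t)) with hLc
  have hne : Lc ≠ [] := by
    rcases List.countP_pos_iff.mp h with ⟨l, hl, hcond⟩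
    simp only [pvCond, decide_eq_true_eq] at hcond
    have hlN : l ∈ pvN classes := by
      simp only [pvN, List.mem_filter, decide_eq_true_eq]
      exact ⟨hl, by omega⟩
    have : l ∈ Lc := by
      simp only [hLc, List.mem_filter, decide_eq_true_eq]
      exact ⟨hlN, by omega⟩
    exact List.ne_nil_of_mem this
  obtain ⟨l₀, hmax⟩ : ∃ l₀, PySem.List.max? Lc pvS = some l₀ := by
    rcases hmem : PySem.List.max? Lc pvS with _ | l₀
    · exact absurd ((PySem.List.max?_eq_none_iff _ _).mp hmem) hne
    · exact ⟨l₀, rfl⟩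
  have hl₀Lc : l₀ ∈ Lc := PySem.List.max?_mem hmax
  have hl₀N : l₀ ∈ pvN classes := by
    simp only [hLc, List.mem_filter] at hl₀Lc; exact hl₀Lc.1
  have hl₀t : pvS l₀ ≤ t := by
    simp only [hLc, List.mem_filter, decide_eq_true_eq] at hl₀Lc; exact hl₀Lc.2
  refine ⟨l₀, hl₀N, ?_⟩
  have hmono : classes.countP (pvCond t) ≤ classes.countP (pvCond (pvS l₀)) := by
    refine List.countP_mono_left (fun l hl hc => ?_)
    simp only [pvCond, decide_eq_true_eq] at hc ⊢
    have hlN : l ∈ pvN classes := by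
      simp only [pvN, List.mem_filter, decide_eq_true_eq]
      exact ⟨hl, by omega⟩
    have hlLc : l ∈ Lc := by
      simp only [hLc, List.mem_filter, decide_eq_true_eq]
      exact ⟨hlN, by omega⟩
    have := PySem.List.max?_isMax hmax l hlLc
    omega
  simp only [pvF]
  exact_mod_cast hmono

-- ---------- the sweep fold ----------

theorem pv_fold_snd (E : List (Int × Int)) (b c : Int) :
    (E.foldl pvStep (b, c)).2 = c + pvSum E := by
  induction E generalizing b c with
  | nil => simp [pvSum]
  | cons hd tl ih =>
    simp only [List.foldl_cons, pvStep, ih, pvSum, List.map_cons, List.sum_cons]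
    ring

theorem pv_fold_fst_ge (E : List (Int × Int)) (b c : Int) :
    b ≤ (E.foldl pvStep (b, c)).1 := by
  induction E generalizing b c with
  | nil => simp
  | cons hd tl ih =>
    simp only [List.foldl_cons, pvStep]
    split
    · exact le_trans (by omega) (ih _ _)
    · exact ih _ _

theorem pv_fold_prefix_le (P Q : List (Int × Int)) (hP : P ≠ []) (b c : Int) :
    c + pvSum P ≤ ((P ++ Q).foldl pvStep (b, c)).1 := by
  rcases List.eq_nil_or_concat P with rfl | ⟨P', x, rfl⟩
  · exact absurd rfl hP
  · rw [List.concat_eq_append, List.foldl_append]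
    calc c + pvSum (P' ++ [x])
        ≤ ((P' ++ [x]).foldl pvStep (b, c)).1 := by
          rw [List.foldl_append]
          have hsnd := pv_fold_snd P' b c
          simp only [List.foldl_cons, List.foldl_nil, pvStep]
          have : pvSum (P' ++ [x]) = pvSum P' + x.2 := by
            simp [pvSum]
          split <;> omega
      _ ≤ _ := by
          rcases hm : (P' ++ [x]).foldl pvStep (b, c) with ⟨b', c'⟩
          exact pv_fold_fst_ge Q b' c'

theorem pv_fold_fst_cases (E : List (Int × Int)) (b c : Int) :
    (E.foldl pvStep (b, c)).1 = b ∨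
      ∃ P Q, E = P ++ Q ∧ P ≠ [] ∧ (E.foldl pvStep (b, c)).1 = c + pvSum P := by
  induction E generalizing b c with
  | nil => simp
  | cons hd tl ih =>
    simp only [List.foldl_cons, pvStep]
    rcases ih (if b < c + hd.2 then c + hd.2 else b) (c + hd.2) with h | ⟨P, Q, hPQ, hPne, h⟩
    · by_cases hb : b < c + hd.2
      · refine Or.inr ⟨[hd], tl, rfl, by simp, ?_⟩
        rw [h, if_pos hb]
        simp [pvSum]
      · left
        rw [h, if_neg hb]
    · refine Or.inr ⟨hd :: P, Q, by simp [hPQ], by simp, ?_⟩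
      rw [h]
      simp only [pvSum, List.map_cons, List.sum_cons]
      ring

-- ---------- order facts about the sorted event list ----------

theorem pv_sorted2_pairwise (E : List (Int × Int)) :
    (PySem.List.sorted2 E (fun ev => ev.1) (fun ev => ev.2) false).Pairwise pvLe := by
  have hcmp :
      (fun (a b : Int × Int) =>
          (decide (a.1 < b.1) || (!decide (b.1 < a.1) && decide (a.2 < b.2))))
        = (fun (a b : Int × Int) =>
            decide ((toLex (a.1, a.2) : Int ×ₗ Int) < toLex (b.1, b.2))) := by
    funext a b
    rw [Bool.eq_iff_iff]
    simp only [Bool.or_eq_true, Bool.and_eq_true, Bool.not_eq_true', decide_eq_true_eq,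
      decide_eq_false_iff_not, Prod.Lex.toLex_lt_toLex]
    omega
  have key : ∀ (acc : List (Int × Int)),
      acc.Pairwise (fun x y => (toLex (x.1, x.2) : Int ×ₗ Int) ≤ toLex (y.1, y.2)) →
      (E.foldl (fun acc x =>
          PySem.List.insertBy
            (fun a b => decide ((toLex (a.1, a.2) : Int ×ₗ Int) < toLex (b.1, b.2))) x acc)
        acc).Pairwise (fun x y => (toLex (x.1, x.2) : Int ×ₗ Int) ≤ toLex (y.1, y.2)) := by
    induction E with
    | nil => intro acc h; exact h
    | cons hd tl ih =>
      intro acc h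
      exact ih _ (PySem.List.insertBy_pairwise_le
        (fun ev : Int × Int => (toLex (ev.1, ev.2) : Int ×ₗ Int)) hd acc h)
  have hmain := key [] (by simp)
  rw [PySem.List.sorted2.eq_def]
  simp only [if_neg (by simp : ¬ (false = true))]
  rw [hcmp]
  refine List.Pairwise.imp ?_ hmain
  intro a b hab
  have h := (@Prod.Lex.toLex_le_toLex Int Int _ _ (a.1, a.2) (b.1, b.2)).mp hab
  simpa [pvLe] using h

theorem pv_le_trans_key (a b k : Int × Int) (h1 : pvLe a b) (h2 : pvLe b k) : pvLe a k := by
  rcases a with ⟨a1, a2⟩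
  rcases b with ⟨b1, b2⟩
  rcases k with ⟨k1, k2⟩
  simp only [pvLe] at h1 h2 ⊢
  omega

-- a downward-closed filter of a pvLe-sorted list is a prefix
theorem pv_filter_prefix (E : List (Int × Int)) (p : Int × Int → Bool)
    (hE : E.Pairwise pvLe)
    (hdc : ∀ a b, pvLe a b → p b = true → p a = true) :
    E = E.filter p ++ E.filter (fun x => !p x) := by
  induction E with
  | nil => simp
  | cons hd tl ih =>
    have htl : tl.Pairwise pvLe := (List.pairwise_cons.mp hE).2
    have hhd : ∀ b ∈ tl, pvLe hd b := (List.pairwise_cons.mp hE).1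
    by_cases hp : p hd = true
    · have h1 : (hd :: tl).filter p = hd :: tl.filter p := by
        simp [hp]
      have h2 : (hd :: tl).filter (fun x => !p x) = tl.filter (fun x => !p x) := by
        simp [hp]
      rw [h1, h2, List.cons_append]
      exact congrArg (hd :: ·) (ih htl)
    · have hnone : tl.filter p = [] := by
        rw [List.filter_eq_nil_iff]
        intro b hb hpb
        exact hp (hdc hd b (hhd b hb) hpb)
      have hall : tl.filter (fun x => !p x) = tl := by
        rw [List.filter_eq_self]
        intro b hb
        by_contra hc
        have : p b = true := by
          simp only [Bool.not_eq_true'] at hc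
          simpa using hc
        exact absurd (List.ne_nil_of_mem (List.mem_filter.mpr ⟨hb, this⟩)) (by simp [hnone])
      simp [hp, hnone, hall]

-- every element of pvEv has delta ±1
theorem pv_ev_delta (classes : List (List Int)) (ev : Int × Int)
    (h : ev ∈ pvEv classes) : ev.2 = 1 ∨ ev.2 = -1 := by
  simp only [pvEv, List.mem_flatMap] at h
  rcases h with ⟨l, _, h⟩
  simp only [List.mem_cons] at h
  rcases h with rfl | rfl | h
  · exact Or.inl rfl
  · exact Or.inr rfl
  · simp at h

-- ---------- the two cumulative-count computations on the sorted list ----------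

-- the sorted event list, abbreviated
def pvSE (classes : List (List Int)) : List (Int × Int) :=
  PySem.List.sorted2 (pvEv classes) (fun ev => ev.1) (fun ev => ev.2) false

theorem pv_se_perm (classes : List (List Int)) : (pvSE classes).Perm (pvEv classes) :=
  PySem.List.sorted2_perm _ _ _ _

theorem pv_se_pairwise (classes : List (List Int)) : (pvSE classes).Pairwise pvLe :=
  pv_sorted2_pairwise _

theorem pv_se_delta (classes : List (List Int)) (ev : Int × Int) (h : ev ∈ pvSE classes) :
    ev.2 = 1 ∨ ev.2 = -1 :=
  pv_ev_delta classes ev ((pv_se_perm classes).mem_iff.mp h)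

-- count of events of pvSE satisfying p, computed on pvN
theorem pv_se_countP (classes : List (List Int)) (p : Int × Int → Bool) :
    (pvSE classes).countP p
      = (pvN classes).countP (fun l => p (pvS l, 1))
        + (pvN classes).countP (fun l => p (pvE l, -1)) := by
  rw [(pv_se_perm classes).countP_eq, pvEv, pv_flat2_countP]

-- the same count, with the two per-lecture predicates given in closed form
theorem pv_se_countP' (classes : List (List Int)) (p : Int × Int → Bool)
    (q1 q2 : List Int → Bool)
    (h1 : ∀ l, p (pvS l, 1) = q1 l) (h2 : ∀ l, p (pvE l, -1) = q2 l) :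
    (pvSE classes).countP p = (pvN classes).countP q1 + (pvN classes).countP q2 := by
  rw [pv_se_countP]
  exact congrArg₂ (· + ·)
    (List.countP_congr (fun l _ => by rw [h1 l]))
    (List.countP_congr (fun l _ => by rw [h2 l]))

-- any nonempty prefix of the sorted event list sums to at most some pvF value
theorem pv_prefix_sum_le (classes : List (List Int)) (P Q : List (Int × Int))
    (hsplit : pvSE classes = P ++ Q) (hP : P ≠ []) :
    ∃ u : Int, pvSum P ≤ pvF classes u := by
  rcases List.eq_nil_or_concat P with rfl | ⟨P', x, rfl⟩
  · exact absurd rfl hP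
  rw [List.concat_eq_append] at hsplit ⊢
  have hpw : ((P' ++ [x]) ++ Q).Pairwise pvLe := by
    rw [← hsplit]; exact pv_se_pairwise classes
  have hmemP : ∀ ev ∈ P' ++ [x], ev ∈ pvSE classes := by
    intro ev hev; rw [hsplit]; exact List.mem_append_left _ hev
  have hmemQ : ∀ ev ∈ Q, ev ∈ pvSE classes := by
    intro ev hev; rw [hsplit]; exact List.mem_append_right _ hev
  have hdP : ∀ ev ∈ P' ++ [x], ev.2 = 1 ∨ ev.2 = -1 :=
    fun ev hev => pv_se_delta classes ev (hmemP ev hev)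
  -- every element of P is pvLe x
  have hlex : ∀ a ∈ P' ++ [x], pvLe a x := by
    intro a ha
    rcases List.mem_append.mp ha with ha' | ha'
    · have := (List.pairwise_append.mp ((List.pairwise_append.mp hpw).1)).2.2
      exact this a ha' x (by simp)
    · simp only [List.mem_singleton] at ha'
      subst ha'; simp [pvLe]
  -- every element of Q is pvLe-above x
  have hxQ : ∀ q ∈ Q, pvLe x q := by
    intro q hq
    exact (List.pairwise_append.mp hpw).2.2 x (by simp) q hq
  have hsub : (P' ++ [x]).Sublist (pvSE classes) := by
    rw [hsplit]; exact List.sublist_append_left _ _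
  rcases pv_se_delta classes x (hmemP x (by simp)) with hx1 | hx1
  · -- last event is a start at time x.1 : bound by pvF at u = x.1
    refine ⟨x.1, ?_⟩
    have hstart : ((P' ++ [x]).countP (fun ev => decide (ev.2 = 1)) : Int)
        ≤ ((pvSE classes).countP (fun ev => decide (ev.2 = 1) && decide (ev.1 ≤ x.1)) : Int) := by
      have h1 : (P' ++ [x]).countP (fun ev => decide (ev.2 = 1))
          = (P' ++ [x]).countP (fun ev => decide (ev.2 = 1) && decide (ev.1 ≤ x.1)) := by
        refine List.countP_congr (fun ev hev => ?_)
        have := hlex ev hev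
        simp only [pvLe] at this
        simp only [Bool.and_eq_true, decide_eq_true_eq]
        constructor
        · intro h; exact ⟨h, by omega⟩
        · intro h; exact h.1
      rw [h1]
      exact_mod_cast hsub.countP_le
    have hend : ((pvSE classes).countP (fun ev => decide (ev.2 = -1) && decide (ev.1 ≤ x.1)) : Int)
        ≤ ((P' ++ [x]).countP (fun ev => decide (ev.2 = -1)) : Int) := by
      have hsplit' : (pvSE classes).countP (fun ev => decide (ev.2 = -1) && decide (ev.1 ≤ x.1))
          = (P' ++ [x]).countP (fun ev => decide (ev.2 = -1) && decide (ev.1 ≤ x.1))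
            + Q.countP (fun ev => decide (ev.2 = -1) && decide (ev.1 ≤ x.1)) := by
        rw [hsplit, List.countP_append]
      have hQ0 : Q.countP (fun ev => decide (ev.2 = -1) && decide (ev.1 ≤ x.1)) = 0 := by
        rw [List.countP_eq_zero]
        intro q hq
        have := hxQ q hq
        simp only [pvLe] at this
        simp only [Bool.and_eq_true, decide_eq_true_eq, not_and]
        intro hq2
        omega
      have hmono : (P' ++ [x]).countP (fun ev => decide (ev.2 = -1) && decide (ev.1 ≤ x.1))
          ≤ (P' ++ [x]).countP (fun ev => decide (ev.2 = -1)) := by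
        refine List.countP_mono_left (fun ev _ h => ?_)
        simp only [Bool.and_eq_true] at h
        exact h.1
      omega
    rw [pv_sum_eq_counts _ hdP, pv_f_split, pvCS, pvCE]
    have hS : (pvSE classes).countP (fun ev => decide (ev.2 = 1) && decide (ev.1 ≤ x.1))
        = (pvN classes).countP (fun l => decide (pvS l ≤ x.1)) := by
      rw [pv_se_countP' classes _ (fun l => decide (pvS l ≤ x.1)) (fun _ => false)
        (fun l => by rw [Bool.eq_iff_iff]; simp) (fun l => by rw [Bool.eq_iff_iff]; simp)]
      simp
    have hE : (pvSE classes).countP (fun ev => decide (ev.2 = -1) && decide (ev.1 ≤ x.1))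
        = (pvN classes).countP (fun l => decide (pvE l ≤ x.1)) := by
      rw [pv_se_countP' classes _ (fun _ => false) (fun l => decide (pvE l ≤ x.1))
        (fun l => by rw [Bool.eq_iff_iff]; simp) (fun l => by rw [Bool.eq_iff_iff]; simp)]
      simp
    rw [← hS, ← hE]
    omega
  · -- last event is an end at time x.1 : bound by pvF at u = x.1 - 1
    refine ⟨x.1 - 1, ?_⟩
    have hstart : ((P' ++ [x]).countP (fun ev => decide (ev.2 = 1)) : Int)
        ≤ ((pvSE classes).countP (fun ev => decide (ev.2 = 1) && decide (ev.1 ≤ x.1 - 1)) : Int) := by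
      have h1 : (P' ++ [x]).countP (fun ev => decide (ev.2 = 1))
          = (P' ++ [x]).countP (fun ev => decide (ev.2 = 1) && decide (ev.1 ≤ x.1 - 1)) := by
        refine List.countP_congr (fun ev hev => ?_)
        have hle := hlex ev hev
        simp only [pvLe] at hle
        simp only [Bool.and_eq_true, decide_eq_true_eq]
        constructor
        · intro h; refine ⟨h, ?_⟩; omega
        · intro h; exact h.1
      rw [h1]
      exact_mod_cast hsub.countP_le
    have hend : ((pvSE classes).countP (fun ev => decide (ev.2 = -1) && decide (ev.1 ≤ x.1 - 1)) : Int)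
        ≤ ((P' ++ [x]).countP (fun ev => decide (ev.2 = -1)) : Int) := by
      have hsplit' : (pvSE classes).countP (fun ev => decide (ev.2 = -1) && decide (ev.1 ≤ x.1 - 1))
          = (P' ++ [x]).countP (fun ev => decide (ev.2 = -1) && decide (ev.1 ≤ x.1 - 1))
            + Q.countP (fun ev => decide (ev.2 = -1) && decide (ev.1 ≤ x.1 - 1)) := by
        rw [hsplit, List.countP_append]
      have hQ0 : Q.countP (fun ev => decide (ev.2 = -1) && decide (ev.1 ≤ x.1 - 1)) = 0 := by
        rw [List.countP_eq_zero]
        intro q hq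
        have := hxQ q hq
        simp only [pvLe] at this
        simp only [Bool.and_eq_true, decide_eq_true_eq, not_and]
        intro hq2
        omega
      have hmono : (P' ++ [x]).countP (fun ev => decide (ev.2 = -1) && decide (ev.1 ≤ x.1 - 1))
          ≤ (P' ++ [x]).countP (fun ev => decide (ev.2 = -1)) := by
        refine List.countP_mono_left (fun ev _ h => ?_)
        simp only [Bool.and_eq_true] at h
        exact h.1
      omega
    rw [pv_sum_eq_counts _ hdP, pv_f_split, pvCS, pvCE]
    have hS : (pvSE classes).countP (fun ev => decide (ev.2 = 1) && decide (ev.1 ≤ x.1 - 1))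
        = (pvN classes).countP (fun l => decide (pvS l ≤ x.1 - 1)) := by
      rw [pv_se_countP' classes _ (fun l => decide (pvS l ≤ x.1 - 1)) (fun _ => false)
        (fun l => by rw [Bool.eq_iff_iff]; simp) (fun l => by rw [Bool.eq_iff_iff]; simp)]
      simp
    have hE : (pvSE classes).countP (fun ev => decide (ev.2 = -1) && decide (ev.1 ≤ x.1 - 1))
        = (pvN classes).countP (fun l => decide (pvE l ≤ x.1 - 1)) := by
      rw [pv_se_countP' classes _ (fun _ => false) (fun l => decide (pvE l ≤ x.1 - 1))
        (fun l => by rw [Bool.eq_iff_iff]; simp) (fun l => by rw [Bool.eq_iff_iff]; simp)]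
      simp
    rw [← hS, ← hE]
    omega

-- for a start s* of a room-occupying lecture there is a nonempty prefix of the sorted
-- event list whose delta sum is exactly pvF classes s*
theorem pv_star_prefix (classes : List (List Int)) (l₀ : List Int) (hl₀ : l₀ ∈ pvN classes) :
    ∃ P Q, pvSE classes = P ++ Q ∧ P ≠ [] ∧ pvSum P = pvF classes (pvS l₀) := by
  classical
  set s := pvS l₀ with hs
  set p : Int × Int → Bool := fun ev => decide (pvLe ev (s, 1)) with hp
  have hdc : ∀ a b, pvLe a b → p b = true → p a = true := by
    intro a b hab hb
    simp only [hp, decide_eq_true_eq] at hb ⊢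
    exact pv_le_trans_key a b (s, 1) hab hb
  have hsplit := pv_filter_prefix (pvSE classes) p (pv_se_pairwise classes) hdc
  refine ⟨(pvSE classes).filter p, (pvSE classes).filter (fun x => !p x), hsplit, ?_, ?_⟩
  · -- (s,1) is in the filtered prefix
    have hmem : ((s : Int), (1 : Int)) ∈ pvEv classes := by
      simp only [pvEv, List.mem_flatMap]
      exact ⟨l₀, hl₀, by simp [hs]⟩
    have hmem' : ((s : Int), (1 : Int)) ∈ pvSE classes :=
      (pv_se_perm classes).mem_iff.mpr hmem
    have hps : p (s, 1) = true := by simp [hp, pvLe]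
    exact List.ne_nil_of_mem (List.mem_filter.mpr ⟨hmem', hps⟩)
  · have hdP : ∀ ev ∈ (pvSE classes).filter p, ev.2 = 1 ∨ ev.2 = -1 := by
      intro ev hev
      exact pv_se_delta classes ev (List.mem_of_mem_filter hev)
    rw [pv_sum_eq_counts _ hdP, pv_f_split, pvCS, pvCE]
    have hS : ((pvSE classes).filter p).countP (fun ev => decide (ev.2 = 1))
        = (pvN classes).countP (fun l => decide (pvS l ≤ s)) := by
      rw [List.countP_filter]
      rw [pv_se_countP' classes _ (fun l => decide (pvS l ≤ s)) (fun _ => false)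
        (fun l => by rw [Bool.eq_iff_iff]; simp [hp, pvLe]; omega)
        (fun l => by rw [Bool.eq_iff_iff]; simp [hp, pvLe])]
      simp
    have hEq : ((pvSE classes).filter p).countP (fun ev => decide (ev.2 = -1))
        = (pvN classes).countP (fun l => decide (pvE l ≤ s)) := by
      rw [List.countP_filter]
      rw [pv_se_countP' classes _ (fun _ => false) (fun l => decide (pvE l ≤ s))
        (fun l => by rw [Bool.eq_iff_iff]; simp [hp, pvLe])
        (fun l => by rw [Bool.eq_iff_iff]; simp [hp, pvLe]; omega)]
      simp
    rw [hS, hEq]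

-- ---------- characterizing A's answer ----------

-- the time points A samples
def pvTimes (classes : List (List Int)) : List Int :=
  PySem.List.sorted
    (classes.foldl
      (fun (ts : PySem.Set Int) lecture =>
        PySem.Set.add (PySem.Set.add ts (pvS lecture)) (pvE lecture)) PySem.Set.empty)
    (fun x => x) false

theorem pv_mem_times (classes : List (List Int)) (t : Int) :
    t ∈ pvTimes classes ↔ ∃ l ∈ classes, pvS l = t ∨ pvE l = t := by
  rw [pvTimes, PySem.List.mem_sorted, pv_foldl_set_mem]
  simp [PySem.Set.empty]

-- A's result, in closed form
theorem pv_A_eq (classes : List (List Int)) (h1 : classes.length ≠ 1) :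
    numberOfRooms classes
      = (PySem.List.max? ((pvTimes classes).map (pvF classes)) (fun x => x)).getD 0 := by
  rw [numberOfRooms]
  rw [if_neg (by simpa using h1)]
  have hmap : ∀ (tl : List Int),
      tl.foldl
        (fun (ov : List Int) time =>
          ov ++ [classes.foldl
            (fun (c : Int) lecture =>
              if ((PySem.List.pyGet? lecture 0).getD 0 ≤ time ∧
                  time < (PySem.List.pyGet? lecture 1).getD 0) then c + 1 else c) 0]) []
        = tl.map (pvF classes) := by
    intro tl
    have hinner : ∀ time : Int,
        classes.foldl
          (fun (c : Int) lecture =>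
            if ((PySem.List.pyGet? lecture 0).getD 0 ≤ time ∧
                time < (PySem.List.pyGet? lecture 1).getD 0) then c + 1 else c) 0
          = pvF classes time := by
      intro time
      have h := PySem.List.foldl_count_if (pvCond time) classes 0
      rw [zero_add] at h
      rw [pvF]
      rw [← h]
      congr 1
      funext c lecture
      simp only [pvCond, pvS, pvE, decide_eq_true_eq]
    calc tl.foldl _ [] = tl.foldl (fun (ov : List Int) time => ov ++ [pvF classes time]) [] := by
          congr 1
          funext ov time
          rw [hinner]
      _ = tl.map (pvF classes) := by
          simpa using PySem.List.foldl_append_singleton_eq_map (pvF classes) tl []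
  simp only [hmap]
  rfl

-- A's answer: attained at a sampled time, and dominating all sampled times
theorem pv_A_char (classes : List (List Int)) (h1 : classes.length ≠ 1)
    (hne : classes ≠ []) :
    (∃ t ∈ pvTimes classes, numberOfRooms classes = pvF classes t) ∧
      (∀ t ∈ pvTimes classes, pvF classes t ≤ numberOfRooms classes) := by
  obtain ⟨l, hl⟩ : ∃ l, l ∈ classes := by
    rcases classes with _ | ⟨l, tl⟩
    · exact absurd rfl hne
    · exact ⟨l, by simp⟩
  have htne : pvS l ∈ pvTimes classes := (pv_mem_times classes _).mpr ⟨l, hl, Or.inl rfl⟩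
  rcases htimes : pvTimes classes with _ | ⟨t0, ts⟩
  · rw [htimes] at htne; simp at htne
  have hmax := PySem.List.max?_id_cons (pvF classes t0) (ts.map (pvF classes))
  rw [pv_A_eq classes h1, htimes]
  simp only [List.map_cons, hmax, Option.getD_some]
  constructor
  · rcases PySem.List.foldl_max_mem (ts.map (pvF classes)) (pvF classes t0) with h | h
    · exact ⟨t0, by simp, h⟩
    · rcases List.mem_map.mp h with ⟨t, ht, hval⟩
      exact ⟨t, by simp [ht], hval.symm⟩
  · intro t ht
    rcases List.mem_cons.mp ht with rfl | ht
    · exact (PySem.List.le_foldl_max (ts.map (pvF classes)) (pvF classes t)).1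
    · exact (PySem.List.le_foldl_max (ts.map (pvF classes)) (pvF classes t0)).2
        _ (List.mem_map.mpr ⟨t, ht, rfl⟩)

-- every pvF value is dominated by A's answer
theorem pv_f_le_A (classes : List (List Int)) (h1 : classes.length ≠ 1)
    (hne : classes ≠ []) (u : Int) :
    pvF classes u ≤ numberOfRooms classes := by
  obtain ⟨⟨t0, ht0, hA⟩, hdom⟩ := pv_A_char classes h1 hne
  have hA0 : 0 ≤ numberOfRooms classes := hA ▸ pv_f_nonneg classes t0
  by_cases hz : 0 < classes.countP (pvCond u)
  · obtain ⟨l₀, hl₀, hle⟩ := pv_star classes u hz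
    have hmem : pvS l₀ ∈ pvTimes classes := by
      refine (pv_mem_times classes _).mpr ⟨l₀, ?_, Or.inl rfl⟩
      exact List.mem_of_mem_filter hl₀
    exact le_trans hle (hdom _ hmem)
  · have : classes.countP (pvCond u) = 0 := by omega
    rw [pvF, this]
    simpa using hA0

-- B's result is the sweep fold over the sorted event list
theorem pv_B_eq (classes : List (List Int)) (h1 : classes.length ≠ 1) :
    numberOfRooms_alt classes = ((pvSE classes).foldl pvStep (0, 0)).1 := by
  rw [numberOfRooms_alt]
  rw [if_neg (by simpa using h1)]
  have hev : classes.foldl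
      (fun (evs : List (Int × Int)) lecture =>
        if ((PySem.List.pyGet? lecture 0).getD 0 < (PySem.List.pyGet? lecture 1).getD 0) then
          evs ++ [((PySem.List.pyGet? lecture 0).getD 0, 1),
                  ((PySem.List.pyGet? lecture 1).getD 0, -1)]
        else evs) []
      = pvEv classes := by
    simpa using pv_foldl_ev classes []
  simp only [hev]
  rfl

-- ===== VERDICT helper: the main equality =====
theorem pv_main (classes : List (List Int)) (hPre : Pre_numberOfRooms classes) :
    numberOfRooms classes = numberOfRooms_alt classes := by
  obtain ⟨hne, _⟩ := hPre
  by_cases h1 : classes.length = 1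
  · rw [numberOfRooms, numberOfRooms_alt, if_pos (by simpa using h1),
      if_pos (by simpa using h1)]
  · rw [pv_B_eq classes h1]
    obtain ⟨⟨t0, ht0, hA⟩, hdom⟩ := pv_A_char classes h1 hne
    have hA0 : 0 ≤ numberOfRooms classes := hA ▸ pv_f_nonneg classes t0
    apply le_antisymm
    · -- A ≤ B
      by_cases hz : 0 < classes.countP (pvCond t0)
      · obtain ⟨l₀, hl₀, hle⟩ := pv_star classes t0 hz
        obtain ⟨P, Q, hsplit, hPne, hsum⟩ := pv_star_prefix classes l₀ hl₀
        have hb := pv_fold_prefix_le P Q hPne 0 0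
        rw [← hsplit] at hb
        rw [hA]
        calc pvF classes t0 ≤ pvF classes (pvS l₀) := hle
          _ = pvSum P := hsum.symm
          _ ≤ _ := by omega
      · have hz0 : classes.countP (pvCond t0) = 0 := by omega
        rw [hA, pvF, hz0]
        simpa using pv_fold_fst_ge (pvSE classes) 0 0
    · -- B ≤ A
      rcases pv_fold_fst_cases (pvSE classes) 0 0 with h | ⟨P, Q, hsplit, hPne, h⟩
      · rw [h]; exact hA0
      · rw [h]
        obtain ⟨u, hu⟩ := pv_prefix_sum_le classes P Q hsplit hPne
        calc (0:Int) + pvSum P = pvSum P := by ring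
          _ ≤ pvF classes u := hu
          _ ≤ numberOfRooms classes := pv_f_le_A classes h1 hne u

-- ===== VERDICT (by name: the statement is the Claim_ definition above) =====
theorem numberOfRooms_spec : Claim_equal_numberOfRooms := by
  intro classes _hDom hPre
  unfold Spec_numberOfRooms
  exact pv_main classes hPre
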